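-- pv_equiv track=rewrite | github.com/Cyberjanie/Cybersecurity | Lab_2_Encryption_/prog_vigenere.py | align_key_to_message_visual
-- ===== SOURCE A (Python) =====
-- def align_key_to_message_visual(msg: str, key_letters: list[str]) -> list[str]:
--     """Return a list `key_for_pos` of length len(msg):
--     - For **letter** positions: consume next key letter.
--     - For **non-letter** positions: display the current key letter (for teaching)
--       but **do not consume** it (so it repeats and is colored red).
--     """
--     out = []
--     p = 0
--     L = len(key_letters)
--     for ch in msg:
--         out.append(key_letters[p % L])
--         if ch.isalpha():
--             p += 1
--     return out
-- ===== SOURCE B (Python) =====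
-- def align_key_to_message_visual(msg: str, key_letters: list[str]) -> list[str]:
--     """Run-length version: cut msg into segments -- each a run of non-letters
--     closed by one letter, plus the trailing run -- then emit the j-th key
--     letter repeated over the whole j-th segment."""
--     segs = []
--     cur = 0
--     for ch in msg:
--         cur += 1
--         if ch.isalpha():
--             segs.append(cur)
--             cur = 0
--     segs.append(cur)
--     L = len(key_letters)
--     out = []
--     for j, n in enumerate(segs):
--         if n:
--             out += [key_letters[j % L]] * n
--     return out
-- ===== Notes on version B (the rewrite author's own statement) =====
-- stated objective: alternative
-- what changed: Replaces the per-character key-counter loop by a run-length segmentation: msg is cut into segments (a run of non-letters closed by one letter, plus a trailing run) and each key letter is emitted repeated over its whole segment, so no per-position counter or modulo per character exists.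
import Mathlib
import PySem

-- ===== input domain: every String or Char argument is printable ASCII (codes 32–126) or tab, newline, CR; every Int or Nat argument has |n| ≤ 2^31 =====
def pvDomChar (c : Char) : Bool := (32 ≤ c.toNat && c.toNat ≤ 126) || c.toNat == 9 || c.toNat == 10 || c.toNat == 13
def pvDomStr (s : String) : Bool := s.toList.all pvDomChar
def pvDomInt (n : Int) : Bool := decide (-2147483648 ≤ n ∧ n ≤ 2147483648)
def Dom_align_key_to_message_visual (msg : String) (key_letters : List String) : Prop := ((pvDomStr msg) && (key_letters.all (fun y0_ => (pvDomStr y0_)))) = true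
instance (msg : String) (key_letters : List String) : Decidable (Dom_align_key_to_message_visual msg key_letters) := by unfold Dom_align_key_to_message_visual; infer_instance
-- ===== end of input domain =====

-- B replaces A's per-character key-counter loop by run-length segmentation: msg is cut
-- into segments (a run of non-letters closed by one letter, plus a trailing run), then
-- each key letter is emitted repeated over its whole segment (alternative decomposition).

-- ===== PORT A =====
-- single loop: append key_letters[p % L], increment p on alphabetic characters
def align_key_to_message_visual (msg : String) (key_letters : List String) : List String :=
  let L : Int := key_letters.length
  (msg.toList.foldl
    (fun (st : List String × Int) ch =>
      (st.1 ++ [PySem.List.pyGetD key_letters (PySem.Int.mod st.2 L) ""],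
       if PySem.Chars.isalpha ch then st.2 + 1 else st.2))
    ([], 0)).1

-- ===== PORT B =====
-- pass 1: segment lengths (each run of non-letters closed by one letter, plus trailing run);
-- pass 2: enumerate segments, emit key_letters[j % L] repeated over segment j
-- pvEmit is exactly the body of B's second loop (out += [key_letters[j % L]] * n; j advances)
def pvEmit (key_letters : List String) (L : Int) (st : List String × Int) (n : Int) : List String × Int :=
  ((if n ≠ 0 then
      st.1 ++ List.replicate n.toNat (PySem.List.pyGetD key_letters (PySem.Int.mod st.2 L) "")
    else st.1), st.2 + 1)

def align_key_to_message_visual_alt (msg : String) (key_letters : List String) : List String :=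
  let st := msg.toList.foldl
    (fun (st : List Int × Int) ch =>
      let cur := st.2 + 1
      if PySem.Chars.isalpha ch then (st.1 ++ [cur], 0) else (st.1, cur))
    ([], 0)
  let segs := st.1 ++ [st.2]
  let L : Int := key_letters.length
  (segs.foldl (pvEmit key_letters L) ([], 0)).1

-- ===== PRECONDITION & SPEC =====
-- Pre_ excludes empty key_letters with a non-empty msg: there Python's `p % L` (resp. `j % L`)
-- raises ZeroDivisionError in A (and in B alike).
def Pre_align_key_to_message_visual (msg : String) (key_letters : List String) : Prop :=
  key_letters ≠ [] ∨ msg = ""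
instance (msg : String) (key_letters : List String) : Decidable (Pre_align_key_to_message_visual msg key_letters) := by unfold Pre_align_key_to_message_visual; infer_instance

def pvWitness_align_key_to_message_visual : String × List String := ("ab, cd!", ["k", "e", "y"])

def Spec_align_key_to_message_visual (msg : String) (key_letters : List String) (out : List String) : Prop := out = align_key_to_message_visual_alt msg key_letters
instance (msg : String) (key_letters : List String) (out : List String) : Decidable (Spec_align_key_to_message_visual msg key_letters out) := by unfold Spec_align_key_to_message_visual; infer_instance

-- ===== CLAIM (what is proved, stated in full; the proofs are below) =====
def Claim_equal_align_key_to_message_visual : Prop := ∀ (msg : String) (key_letters : List String), Dom_align_key_to_message_visual msg key_letters → Pre_align_key_to_message_visual msg key_letters → Spec_align_key_to_message_visual msg key_letters (align_key_to_message_visual msg key_letters)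

-- ===== LEMMAS AND PROOFS =====

-- recursive characterisation of A's output: one key letter per char, counter p
def pvF (key_letters : List String) (L : Int) : List Char → Int → List String
  | [], _ => []
  | ch :: cs, p =>
      PySem.List.pyGetD key_letters (PySem.Int.mod p L) "" ::
        pvF key_letters L cs (if PySem.Chars.isalpha ch then p + 1 else p)

-- recursive characterisation of B's first pass: segment lengths and open trailing run
def pvSeg : List Char → Int → List Int × Int
  | [], cur => ([], cur)
  | ch :: cs, cur =>
      if PySem.Chars.isalpha ch then
        ((cur + 1) :: (pvSeg cs 0).1, (pvSeg cs 0).2)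
      else pvSeg cs (cur + 1)

-- recursive characterisation of B's second pass
def pvP2 (key_letters : List String) (L : Int) : List Int → Int → List String
  | [], _ => []
  | n :: rest, j =>
      (if n ≠ 0 then
        List.replicate n.toNat (PySem.List.pyGetD key_letters (PySem.Int.mod j L) "")
      else []) ++ pvP2 key_letters L rest (j + 1)

theorem pvA_fold (key_letters : List String) (L : Int) :
    ∀ (cs : List Char) (acc : List String) (p : Int),
      (cs.foldl
        (fun (st : List String × Int) ch =>
          (st.1 ++ [PySem.List.pyGetD key_letters (PySem.Int.mod st.2 L) ""],
           if PySem.Chars.isalpha ch then st.2 + 1 else st.2))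
        (acc, p)).1 = acc ++ pvF key_letters L cs p := by
  intro cs
  induction cs with
  | nil => intro acc p; simp [pvF]
  | cons ch cs ih =>
      intro acc p
      simp only [List.foldl, pvF]
      rw [ih]
      simp

theorem pvB_fold1 :
    ∀ (cs : List Char) (segs : List Int) (cur : Int),
      (cs.foldl
        (fun (st : List Int × Int) ch =>
          let c := st.2 + 1
          if PySem.Chars.isalpha ch then (st.1 ++ [c], 0) else (st.1, c))
        (segs, cur)) = (segs ++ (pvSeg cs cur).1, (pvSeg cs cur).2) := by
  intro cs
  induction cs with
  | nil => intro segs cur; simp [pvSeg]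
  | cons ch cs ih =>
      intro segs cur
      simp only [List.foldl, pvSeg]
      by_cases h : PySem.Chars.isalpha ch = true
      · simp [h, ih]
      · simp [h, ih]

theorem pvB_fold2 (key_letters : List String) (L : Int) :
    ∀ (xs : List Int) (acc : List String) (j : Int),
      (xs.foldl (pvEmit key_letters L) (acc, j)).1 = acc ++ pvP2 key_letters L xs j := by
  intro xs
  induction xs with
  | nil => intro acc j; simp [pvP2]
  | cons n rest ih =>
      intro acc j
      by_cases h : n = 0
      · have hstep : pvEmit key_letters L (acc, j) n = (acc, j + 1) := by simp [pvEmit, h]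
        rw [List.foldl_cons, hstep, ih]
        simp [pvP2, h]
      · have hstep : pvEmit key_letters L (acc, j) n
            = (acc ++ List.replicate n.toNat (PySem.List.pyGetD key_letters (PySem.Int.mod j L) ""), j + 1) := by
          simp [pvEmit, h]
        rw [List.foldl_cons, hstep, ih]
        simp [pvP2, h]

-- the segmented second pass reproduces the per-character recursion
theorem pvSeg_p2 (key_letters : List String) (L : Int) :
    ∀ (cs : List Char) (cur j : Int), 0 ≤ cur →
      pvP2 key_letters L ((pvSeg cs cur).1 ++ [(pvSeg cs cur).2]) j
        = List.replicate cur.toNat (PySem.List.pyGetD key_letters (PySem.Int.mod j L) "")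
            ++ pvF key_letters L cs j := by
  intro cs
  induction cs with
  | nil =>
      intro cur j _
      by_cases h : cur = 0
      · simp [pvSeg, pvP2, pvF, h]
      · simp [pvSeg, pvP2, pvF, h]
  | cons ch cs ih =>
      intro cur j hcur
      have hrep : (cur + 1).toNat = cur.toNat + 1 := by omega
      by_cases h : PySem.Chars.isalpha ch = true
      · have hseg : pvSeg (ch :: cs) cur = ((cur + 1) :: (pvSeg cs 0).1, (pvSeg cs 0).2) := by
          simp [pvSeg, h]
        have hf : pvF key_letters L (ch :: cs) j
            = PySem.List.pyGetD key_letters (PySem.Int.mod j L) "" :: pvF key_letters L cs (j + 1) := by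
          simp [pvF, h]
        rw [hseg, hf]
        simp only [List.cons_append, pvP2]
        rw [ih 0 (j + 1) le_rfl]
        have hne : ¬(cur + 1 = 0) := by omega
        simp [hne, hrep, List.replicate_succ']
      · have hseg : pvSeg (ch :: cs) cur = pvSeg cs (cur + 1) := by
          simp [pvSeg, h]
        have hf : pvF key_letters L (ch :: cs) j
            = PySem.List.pyGetD key_letters (PySem.Int.mod j L) "" :: pvF key_letters L cs j := by
          simp [pvF, h]
        rw [hseg, hf, ih (cur + 1) j (by omega), hrep, List.replicate_succ']
        simp

-- ===== VERDICT (by name: the statement is the Claim_ definition above) =====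
theorem align_key_to_message_visual_spec : Claim_equal_align_key_to_message_visual := by
  intro msg key_letters _ _
  unfold Spec_align_key_to_message_visual align_key_to_message_visual align_key_to_message_visual_alt
  simp only []
  rw [pvA_fold key_letters (key_letters.length : Int) msg.toList [] 0]
  rw [pvB_fold1 msg.toList [] 0]
  simp only [List.nil_append]
  rw [pvB_fold2 key_letters (key_letters.length : Int) _ [] 0]
  rw [pvSeg_p2 key_letters (key_letters.length : Int) msg.toList 0 0 le_rfl]
  simp
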